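-- pv_equiv track=rewrite | github.com/khalilhamody9/AIfinal | ex1.py | The_Mask
-- ===== SOURCE A (Python) =====
-- SWITCH_PLATES = list(range(20, 30))
--
-- def The_Mask(layout):
--     bitmask = 0
--     i = 0
--     while i < len(layout):
--         line = layout[i]
--         j = 0
--         while j < len(line):
--             cell = line[j]
--             if cell in SWITCH_PLATES:
--                 bitmask |= 1 << (cell % 10)
--             j += 1
--         i += 1
--     return bitmask
-- ===== SOURCE B (Python) =====
-- SWITCH_PLATES = list(range(20, 30))
--
-- def The_Mask(layout):
--     # One pass to index which cell values occur, then decide per plate value.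
--     present = set()
--     for line in layout:
--         for cell in line:
--             present.add(cell)
--     bitmask = 0
--     for v in range(20, 30):
--         if v in present:
--             bitmask |= 1 << (v % 10)
--     return bitmask
-- ===== Notes on version B (the rewrite author's own statement) =====
-- stated objective: faster
-- what changed: Instead of testing every cell against the 10-element plate list, B builds a set of all cell values in one pass and then loops over the ten plate values 20..29, setting a bit when the plate value is present.
import Mathlib
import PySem

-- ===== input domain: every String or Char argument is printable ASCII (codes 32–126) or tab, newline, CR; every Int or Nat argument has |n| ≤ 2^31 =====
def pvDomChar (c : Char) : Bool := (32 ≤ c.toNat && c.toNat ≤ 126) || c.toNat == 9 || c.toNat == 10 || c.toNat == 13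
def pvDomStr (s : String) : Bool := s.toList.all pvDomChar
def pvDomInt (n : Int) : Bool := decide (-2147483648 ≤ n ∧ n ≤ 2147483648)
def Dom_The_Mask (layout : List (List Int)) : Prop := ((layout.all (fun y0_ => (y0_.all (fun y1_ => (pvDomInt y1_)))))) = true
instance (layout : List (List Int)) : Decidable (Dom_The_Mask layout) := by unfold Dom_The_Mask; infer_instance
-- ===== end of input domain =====

-- B replaces the per-cell scan of the plate list by a set of cell values built once,
-- then a loop over the ten plate values (objective: faster by a constant factor).

-- ===== PORT A =====
def SWITCH_PLATES : List Int := PySem.List.pyRange 20 30 1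

def The_Mask (layout : List (List Int)) : Int :=
  layout.foldl
    (fun bitmask line =>
      line.foldl
        (fun bm cell =>
          if SWITCH_PLATES.contains cell then
            -- Python: bitmask |= 1 << (cell % 10); cell % 10 ≥ 0, so .toNat is exact
            PySem.Int.bor bm ((1 : Int) <<< (PySem.Int.mod cell 10).toNat)
          else bm)
        bitmask)
    0

-- ===== PORT B =====
def The_Mask_alt (layout : List (List Int)) : Int :=
  let present : PySem.Set Int :=
    layout.foldl (fun s line => line.foldl (fun s cell => PySem.Set.add s cell) s) PySem.Set.empty
  (PySem.List.pyRange 20 30 1).foldl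
    (fun bm v =>
      if PySem.Set.contains present v then
        PySem.Int.bor bm ((1 : Int) <<< (PySem.Int.mod v 10).toNat)
      else bm)
    0

-- ===== PRECONDITION & SPEC =====
def Spec_The_Mask (layout : List (List Int)) (out : Int) : Prop := out = The_Mask_alt layout
instance (layout : List (List Int)) (out : Int) : Decidable (Spec_The_Mask layout out) := by unfold Spec_The_Mask; infer_instance

-- ===== CLAIM (what is proved, stated in full; the proofs are below) =====
def Claim_equal_The_Mask : Prop := ∀ (layout : List (List Int)), Dom_The_Mask layout → Spec_The_Mask layout (The_Mask layout)

-- ===== LEMMAS AND PROOFS =====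

-- The common loop body, on Nat, parametrised by the Bool test p.
def pvStepN (p : Int → Bool) (bm : Nat) (c : Int) : Nat :=
  if p c then bm ||| (1 <<< (PySem.Int.mod c 10).toNat) else bm

theorem pvShift1 (k : Nat) : (1 : Int) <<< k = ((1 <<< k : Nat) : Int) := by
  simp [Int.shiftLeft_eq, Nat.shiftLeft_eq]

-- Folding the Int loop body from a Nat-cast accumulator is the Nat fold, cast.
theorem pvFoldl_cast (p : Int → Bool) (cs : List Int) (m : Nat) :
    cs.foldl (fun bm c => if p c then PySem.Int.bor bm ((1 : Int) <<< (PySem.Int.mod c 10).toNat) else bm) (↑m)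
      = ↑(cs.foldl (pvStepN p) m) := by
  induction cs generalizing m with
  | nil => rfl
  | cons c cs ih =>
    simp only [List.foldl_cons, pvStepN]
    split
    · rw [pvShift1, PySem.Int.bor_natCast, ih]
    · exact ih _

-- Bit t of the fold: it was set before, or some element passes the test and lands on bit t.
theorem pvTestBit (p : Int → Bool) (cs : List Int) (m t : Nat) :
    (cs.foldl (pvStepN p) m).testBit t
      = (m.testBit t || cs.any (fun c => p c && decide ((PySem.Int.mod c 10).toNat = t))) := by
  induction cs generalizing m with
  | nil => simp
  | cons c cs ih =>
    simp only [List.foldl_cons, List.any_cons, pvStepN]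
    rw [ih]
    by_cases h : p c = true
    · simp [h, Nat.shiftLeft_eq, Nat.testBit_or, Nat.testBit_two_pow, Bool.or_assoc]
    · simp [h]

theorem pvA_eq (layout : List (List Int)) :
    The_Mask layout = ↑(layout.flatten.foldl (pvStepN (fun c => SWITCH_PLATES.contains c)) 0) := by
  unfold The_Mask
  rw [← List.foldl_flatten]
  have := pvFoldl_cast (fun c => SWITCH_PLATES.contains c) layout.flatten 0
  simpa using this

theorem pvPresent_eq (layout : List (List Int)) :
    layout.foldl (fun s line => line.foldl (fun s cell => PySem.Set.add s cell) s) PySem.Set.empty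
      = PySem.Set.ofList layout.flatten := by
  rw [← List.foldl_flatten]
  rfl

theorem pvB_eq (layout : List (List Int)) :
    The_Mask_alt layout
      = ↑(SWITCH_PLATES.foldl
            (pvStepN (fun v => PySem.Set.contains (PySem.Set.ofList layout.flatten) v)) 0) := by
  unfold The_Mask_alt
  rw [pvPresent_eq]
  have := pvFoldl_cast (fun v => PySem.Set.contains (PySem.Set.ofList layout.flatten) v) SWITCH_PLATES 0
  simpa [SWITCH_PLATES] using this

-- Scanning the cells for plate values sees exactly the same hits as scanning the plate
-- values for present cells.
theorem pvAny_swap (fl : List Int) (t : Nat) :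
    fl.any (fun c => SWITCH_PLATES.contains c && decide ((PySem.Int.mod c 10).toNat = t))
      = SWITCH_PLATES.any
          (fun v => PySem.Set.contains (PySem.Set.ofList fl) v && decide ((PySem.Int.mod v 10).toNat = t)) := by
  rw [Bool.eq_iff_iff]
  simp only [List.any_eq_true, Bool.and_eq_true, decide_eq_true_eq, List.contains_iff_mem,
    PySem.Set.contains_iff, PySem.Set.mem_ofList]
  tauto

-- ===== VERDICT (by name: the statement is the Claim_ definition above) =====
theorem The_Mask_spec : Claim_equal_The_Mask := by
  intro layout _
  unfold Spec_The_Mask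
  rw [pvA_eq, pvB_eq]
  congr 1
  apply Nat.eq_of_testBit_eq
  intro t
  rw [pvTestBit, pvTestBit]
  simp only [Nat.zero_testBit, Bool.false_or]
  exact pvAny_swap layout.flatten t
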